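-- pv_equiv track=rewrite | github.com/haru-44/prime_text | src/intersection.py | intersection_dup
-- ===== SOURCE A (Python) =====
-- from typing import Any, Iterator, List, Tuple
--
-- def intersection_dup(a: List[Any], b: List[Any]) -> Iterator[Tuple[Any, List[int], List[int]]]:
--     """ aとbの共通部分を求める。
--
--     重複がある場合は、そのインデックスすべてをリストとして返す
--
--     Args:
--         a,b: List[Any]: 多重集合
--
--     Yields:
--         (Any, List[int], List[int]): 共通部分の元, その元のaでのインデックスのリスト, その元のbでのインデックスのリスト
--
--     Examples:
--         >>> list(intersection_dup([3, 2, 4, 2], [1, 0, 8, 3, 3, 2]))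
--         [(2, [1, 3], [5]), (3, [0], [3, 4])]
--     """
--     a = sorted(zip(a, range(len(a))), key=lambda x: x[0])
--     b = sorted(zip(b, range(len(b))), key=lambda x: x[0])
--     i = j = 0
--     while i < len(a) and j < len(b):
--         if a[i][0] <= b[j][0]:
--             if a[i][0] == b[j][0]:
--                 list_a = [a[i][1]]
--                 list_b = [b[j][1]]
--                 e = a[i][0]
--                 i += 1
--                 while i < len(a) and a[i][0] == a[i - 1][0]:
--                     list_a.append(a[i][1])
--                     i += 1
--                 j += 1
--                 while j < len(b) and b[j][0] == b[j - 1][0]: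
--                     list_b.append(b[j][1])
--                     j += 1
--                 yield e, list_a, list_b
--             else:
--                 i += 1
--                 while i < len(a) - 1 and a[i][0] == a[i - 1][0]:
--                     i += 1
--         else:
--             j += 1
--             while j < len(b) - 1 and b[j][0] == b[j - 1][0]:
--                 j += 1
-- ===== SOURCE B (Python) =====
-- def intersection_dup(a, b):
--     da = {}
--     for i, x in enumerate(a):
--         da.setdefault(x, []).append(i)
--     db = {}
--     for j, y in enumerate(b):
--         db.setdefault(y, []).append(j)
--     return [(k, da[k], db[k]) for k in sorted(k for k in da if k in db)]
-- ===== Notes on version B (the rewrite author's own statement) =====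
-- stated objective: faster
-- what changed: A sorts both full lists with their indices and runs a two-pointer merge with duplicate-skipping inner loops; B builds one index dict per list in a single pass and sorts only the distinct common keys.
import Mathlib
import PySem

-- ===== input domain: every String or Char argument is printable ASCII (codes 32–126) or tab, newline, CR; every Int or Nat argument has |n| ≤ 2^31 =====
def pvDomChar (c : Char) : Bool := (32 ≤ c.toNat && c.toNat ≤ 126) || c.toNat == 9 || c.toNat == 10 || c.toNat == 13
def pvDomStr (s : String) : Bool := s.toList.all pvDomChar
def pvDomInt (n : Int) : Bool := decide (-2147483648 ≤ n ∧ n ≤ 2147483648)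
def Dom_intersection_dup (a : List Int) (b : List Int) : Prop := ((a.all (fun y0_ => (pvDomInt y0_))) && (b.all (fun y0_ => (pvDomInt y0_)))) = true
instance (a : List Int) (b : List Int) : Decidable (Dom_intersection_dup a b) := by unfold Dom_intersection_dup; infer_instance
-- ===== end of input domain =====

-- B replaces A's sort-everything-and-merge by per-list index dictionaries plus a sort of only the
-- distinct common keys (objective: faster; the claim proved is exact equality of the return values).


-- ===== PORT A =====
-- inner while `while i < len(a) and a[i][0] == a[i-1][0]: list_a.append(a[i][1]); i += 1`
-- on the suffix after position i, with `e` the previously consumed key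
def pvTakeDup (e : Int) : List (Int × Int) → List Int × List (Int × Int)
  | [] => ([], [])
  | x :: xs =>
    if x.1 = e then
      let r := pvTakeDup x.1 xs
      (x.2 :: r.1, r.2)
    else ([], x :: xs)

-- skip loop `while i < len(a) - 1 and a[i][0] == a[i-1][0]: i += 1` (note: stops before the LAST element)
def pvSkipDup (e : Int) : List (Int × Int) → List (Int × Int)
  | x :: y :: t => if x.1 = e then pvSkipDup x.1 (y :: t) else x :: y :: t
  | l => l

theorem pvTakeDup_len (e : Int) (l : List (Int × Int)) : (pvTakeDup e l).2.length ≤ l.length := by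
  induction l generalizing e with
  | nil => simp [pvTakeDup]
  | cons x xs ih =>
    simp only [pvTakeDup]
    split
    · exact Nat.le_succ_of_le (ih x.1)
    · simp

theorem pvSkipDup_len (e : Int) (l : List (Int × Int)) : (pvSkipDup e l).length ≤ l.length := by
  induction l generalizing e with
  | nil => simp [pvSkipDup]
  | cons x xs ih =>
    cases xs with
    | nil => simp [pvSkipDup]
    | cons y t =>
      simp only [pvSkipDup]
      split
      · exact Nat.le_succ_of_le (ih x.1)
      · simp

-- the outer `while i < len(a) and j < len(b)` loop, on the two suffixes
def pvLoop : List (Int × Int) → List (Int × Int) → List (Int × List Int × List Int)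
  | x :: xs, y :: ys =>
    if x.1 ≤ y.1 then
      if x.1 = y.1 then
        let ra := pvTakeDup x.1 xs
        let rb := pvTakeDup y.1 ys
        (x.1, x.2 :: ra.1, y.2 :: rb.1) :: pvLoop ra.2 rb.2
      else pvLoop (pvSkipDup x.1 xs) (y :: ys)
    else pvLoop (x :: xs) (pvSkipDup y.1 ys)
  | _, _ => []
  termination_by s t => s.length + t.length
  decreasing_by
  · have ha := pvTakeDup_len x.1 xs
    have hb := pvTakeDup_len y.1 ys
    simp only [List.length_cons]; omega
  · have ha := pvSkipDup_len x.1 xs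
    simp only [List.length_cons]; omega
  · have hb := pvSkipDup_len y.1 ys
    simp only [List.length_cons]; omega

def intersection_dup (a : List Int) (b : List Int) : List (Int × List Int × List Int) :=
  pvLoop
    (PySem.List.sorted (a.zip (PySem.List.pyRange 0 (a.length : Int) 1)) (fun x => x.1))
    (PySem.List.sorted (b.zip (PySem.List.pyRange 0 (b.length : Int) 1)) (fun x => x.1))

-- ===== PORT B =====
-- `d = {}; for i, x in enumerate(xs): d.setdefault(x, []).append(i)`
def pvIndexDict (xs : List Int) : PySem.Dict Int (List Int) :=
  (PySem.List.enumerate xs).foldl (fun d p => d.modify p.2 [] (fun l => l ++ [p.1])) PySem.Dict.empty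

-- `[(k, da[k], db[k]) for k in sorted(k for k in da if k in db)]`
-- (da[k]/db[k] ported as getD _ []: every k produced by the comprehension is a key of both dicts,
--  so Python's `[]` lookup returns and equals getD there)
def intersection_dup_alt (a : List Int) (b : List Int) : List (Int × List Int × List Int) :=
  let da := pvIndexDict a
  let db := pvIndexDict b
  (PySem.List.sorted (da.keys.filter (fun k => db.contains k)) (fun k => k)).map
    (fun k => (k, da.getD k [], db.getD k []))

-- ===== PRECONDITION & SPEC =====
def Spec_intersection_dup (a : List Int) (b : List Int) (out : List (Int × List Int × List Int)) : Prop := out = intersection_dup_alt a b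
instance (a : List Int) (b : List Int) (out : List (Int × List Int × List Int)) : Decidable (Spec_intersection_dup a b out) := by unfold Spec_intersection_dup; infer_instance

-- ===== CLAIM (what is proved, stated in full; the proofs are below) =====
def Claim_equal_intersection_dup : Prop := ∀ (a : List Int) (b : List Int), Dom_intersection_dup a b → Spec_intersection_dup a b (intersection_dup a b)

-- ===== LEMMAS AND PROOFS =====

theorem pvLoop_nil_left (t : List (Int × Int)) : pvLoop [] t = [] := by
  cases t <;> simp [pvLoop]
theorem pvLoop_nil_right (s : List (Int × Int)) : pvLoop s [] = [] := by
  cases s <;> simp [pvLoop]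
theorem pvLoop_cons_cons (x y : Int × Int) (xs ys : List (Int × Int)) :
    pvLoop (x :: xs) (y :: ys) =
      if x.1 ≤ y.1 then
        if x.1 = y.1 then
          (x.1, x.2 :: (pvTakeDup x.1 xs).1, y.2 :: (pvTakeDup y.1 ys).1)
            :: pvLoop (pvTakeDup x.1 xs).2 (pvTakeDup y.1 ys).2
        else pvLoop (pvSkipDup x.1 xs) (y :: ys)
      else pvLoop (x :: xs) (pvSkipDup y.1 ys) := by
  rw [pvLoop]

def pvGroupVals : List (Int × Int) → List Int
  | [] => []
  | x :: xs => x.1 :: pvGroupVals (xs.dropWhile (fun p => p.1 == x.1))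
  termination_by l => l.length
  decreasing_by
    have := List.length_dropWhile_le (fun p => p.1 == x.1) xs
    simp only [List.length_cons]; omega

theorem pvTakeDup_eq (e : Int) (l : List (Int × Int)) :
    pvTakeDup e l = ((l.takeWhile (fun p => p.1 == e)).map (·.2), l.dropWhile (fun p => p.1 == e)) := by
  induction l generalizing e with
  | nil => simp [pvTakeDup]
  | cons x xs ih =>
    simp only [pvTakeDup, List.takeWhile_cons, List.dropWhile_cons]
    by_cases h : x.1 = e
    · subst h
      simp only [ih x.1, beq_self_eq_true, if_true, List.map_cons]
    · simp [h, beq_iff_eq]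

theorem pvSkipDup_spec (e : Int) (l : List (Int × Int)) :
    ∃ pre, l = pre ++ pvSkipDup e l ∧ (∀ p ∈ pre, p.1 = e) ∧
      (∀ z rest, pvSkipDup e l = z :: rest → rest ≠ [] → z.1 ≠ e) := by
  induction l generalizing e with
  | nil => exact ⟨[], by simp [pvSkipDup]⟩
  | cons x xs ih =>
    cases xs with
    | nil =>
      refine ⟨[], by simp [pvSkipDup], by simp, ?_⟩
      intro z rest h hne
      simp [pvSkipDup] at h
      simp [h.2] at hne
    | cons y t =>
      by_cases h : x.1 = e
      · obtain ⟨pre, h1, h2, h3⟩ := ih x.1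
        refine ⟨x :: pre, ?_, ?_, ?_⟩
        · simpa [pvSkipDup, h] using congrArg (x :: ·) h1
        · intro p hp
          rcases List.mem_cons.1 hp with rfl | hp
          · exact h
          · exact (h2 p hp).trans h
        · intro z rest hz
          rw [show pvSkipDup e (x :: y :: t) = pvSkipDup x.1 (y :: t) from by
            simp only [pvSkipDup, if_pos h]] at hz
          exact fun hne => h ▸ h3 z rest hz hne
      · refine ⟨[], by simp [pvSkipDup, h], by simp, ?_⟩
        intro z rest hz hne
        simp only [pvSkipDup, if_neg h] at hz
        cases hz; exact h

theorem pvGroupVals_cons (x : Int × Int) (xs : List (Int × Int)) :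
    pvGroupVals (x :: xs) = x.1 :: pvGroupVals (xs.dropWhile (fun p => p.1 == x.1)) := by
  simp [pvGroupVals]

theorem pvGroupVals_mem (s : List (Int × Int)) (v : Int) :
    v ∈ pvGroupVals s ↔ v ∈ s.map (·.1) := by
  fun_induction pvGroupVals s with
  | case1 => simp
  | case2 x xs ih =>
    simp only [List.mem_cons, List.map_cons, ih]
    constructor
    · rintro (rfl | h)
      · exact .inl rfl
      · obtain ⟨p, hp, rfl⟩ := List.mem_map.1 h
        exact .inr (List.mem_map.2 ⟨p, (List.dropWhile_sublist _).subset hp, rfl⟩)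
    · rintro (rfl | h)
      · exact .inl rfl
      · obtain ⟨p, hp, rfl⟩ := List.mem_map.1 h
        by_cases hv : p.1 = x.1
        · exact .inl hv
        · refine .inr (List.mem_map.2 ⟨p, ?_, rfl⟩)
          have := List.takeWhile_append_dropWhile (p := fun p : Int × Int => p.1 == x.1) (l := xs)
          rw [← this] at hp
          rcases List.mem_append.1 hp with h1 | h1
          · exact absurd (by simpa using List.mem_takeWhile_imp h1) hv
          · exact h1

theorem pvDropWhile_head_ne (xs : List (Int × Int)) (x z : Int × Int) (rest : List (Int × Int))
    (hd : xs.dropWhile (fun p => p.1 == x.1) = z :: rest) : z.1 ≠ x.1 := by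
  induction xs with
  | nil => simp at hd
  | cons w ws ih =>
    rw [List.dropWhile_cons] at hd
    split at hd
    · exact ih hd
    · next h => cases hd; simpa using h

theorem pvDropWhile_gt (x : Int × Int) (xs : List (Int × Int))
    (hs : (x :: xs).Pairwise (fun p q => p.1 ≤ q.1)) :
    ∀ p ∈ xs.dropWhile (fun p => p.1 == x.1), x.1 < p.1 := by
  have hxs : xs.Pairwise (fun p q => p.1 ≤ q.1) := hs.tail
  have hle : ∀ p ∈ xs, x.1 ≤ p.1 := fun p hp => List.rel_of_pairwise_cons hs hp
  cases hd : xs.dropWhile (fun p => p.1 == x.1) with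
  | nil => simp
  | cons z rest =>
    have hz : z.1 ≠ x.1 := pvDropWhile_head_ne xs x z rest hd
    have hzmem : z ∈ xs := (List.dropWhile_sublist _).subset (by rw [hd]; simp)
    have hzgt : x.1 < z.1 := lt_of_le_of_ne (hle z hzmem) (Ne.symm hz)
    intro p hp
    rcases List.mem_cons.1 hp with rfl | hp
    · exact hzgt
    · have hdw : (z :: rest).Pairwise (fun p q => p.1 ≤ q.1) :=
        hd ▸ (List.Pairwise.sublist (List.dropWhile_sublist _) hxs)
      exact lt_of_lt_of_le hzgt (List.rel_of_pairwise_cons hdw hp)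

theorem pvGroupVals_pairwise (s : List (Int × Int)) (hs : s.Pairwise (fun p q => p.1 ≤ q.1)) :
    (pvGroupVals s).Pairwise (· < ·) := by
  induction s using pvGroupVals.induct with
  | case1 => rw [show pvGroupVals [] = [] from by simp [pvGroupVals]]; exact List.Pairwise.nil
  | case2 x xs ih =>
    rw [pvGroupVals_cons]
    refine List.pairwise_cons.2 ⟨?_, ih (List.Pairwise.sublist (List.dropWhile_sublist _) hs.tail)⟩
    intro v hv
    obtain ⟨p, hp, rfl⟩ := List.mem_map.1 ((pvGroupVals_mem _ _).1 hv)
    exact pvDropWhile_gt x xs hs p hp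

theorem pvFilter_nil_of_gt (v : Int) (l : List (Int × Int)) (h : ∀ p ∈ l, v < p.1) :
    l.filter (fun p => p.1 == v) = [] := by
  rw [List.filter_eq_nil_iff]
  intro p hp
  simp only [beq_iff_eq]
  exact ne_of_gt (h p hp)

theorem pvFilter_head (x : Int × Int) (xs : List (Int × Int))
    (hs : (x :: xs).Pairwise (fun p q => p.1 ≤ q.1)) :
    (x :: xs).filter (fun p => p.1 == x.1) = x :: xs.takeWhile (fun p => p.1 == x.1) := by
  rw [List.filter_cons_of_pos (by simp)]
  congr 1
  conv_lhs => rw [← List.takeWhile_append_dropWhile (p := fun p : Int × Int => p.1 == x.1) (l := xs)]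
  rw [List.filter_append, List.filter_eq_self.2 (fun p hp => List.mem_takeWhile_imp (p := fun q : Int × Int => q.1 == x.1) hp),
    pvFilter_nil_of_gt x.1 _ (pvDropWhile_gt x xs hs), List.append_nil]

-- stability of the PySem insertion sort on one key class
theorem pvInsertBy_filter (x : Int × Int) (acc : List (Int × Int)) (v : Int)
    (hacc : acc.Pairwise (fun p q => p.1 ≤ q.1)) :
    (PySem.List.insertBy (fun a b : Int × Int => decide (a.1 < b.1)) x acc).filter (fun p => p.1 == v)
      = acc.filter (fun p => p.1 == v) ++ if x.1 == v then [x] else [] := by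
  induction acc with
  | nil => simp only [PySem.List.insertBy, List.filter_nil, List.nil_append]; split <;> simp_all
  | cons y ys ih =>
    rw [show PySem.List.insertBy (fun a b : Int × Int => decide (a.1 < b.1)) x (y :: ys)
        = if decide (x.1 < y.1) = true then x :: y :: ys
          else y :: PySem.List.insertBy (fun a b : Int × Int => decide (a.1 < b.1)) x ys from rfl]
    split
    · next hlt =>
      simp only [decide_eq_true_eq] at hlt
      by_cases hxv : x.1 = v
      · have hnil : (y :: ys).filter (fun p => p.1 == v) = [] := by
          refine pvFilter_nil_of_gt v _ ?_
          intro p hp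
          rcases List.mem_cons.1 hp with rfl | hp
          · exact hxv ▸ hlt
          · exact lt_of_lt_of_le (hxv ▸ hlt) (List.rel_of_pairwise_cons hacc hp)
        rw [List.filter_cons_of_pos (by simp [hxv]), hnil]
        simp [hxv]
      · rw [List.filter_cons_of_neg (by simp [hxv])]
        simp [hxv]
    · next hge =>
      by_cases hyv : y.1 = v
      · rw [List.filter_cons_of_pos (by simp [hyv]), List.filter_cons_of_pos (by simp [hyv]),
          ih hacc.tail]
        simp
      · rw [List.filter_cons_of_neg (by simp [hyv]), List.filter_cons_of_neg (by simp [hyv]),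
          ih hacc.tail]

theorem pvSorted_filter_key' (l : List (Int × Int)) (v : Int) :
    (PySem.List.sorted l (fun x => x.1)).filter (fun p => p.1 == v) = l.filter (fun p => p.1 == v) := by
  induction l using List.reverseRecOn with
  | nil => simp [PySem.List.sorted_eq_foldl_insertBy]
  | append_singleton l x ih =>
    have hfold : PySem.List.sorted (l ++ [x]) (fun p : Int × Int => p.1)
        = PySem.List.insertBy (fun a b : Int × Int => decide (a.1 < b.1)) x
            (PySem.List.sorted l (fun p : Int × Int => p.1)) := by
      rw [PySem.List.sorted_eq_foldl_insertBy, PySem.List.sorted_eq_foldl_insertBy,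
        List.foldl_append]
      rfl
    rw [hfold, pvInsertBy_filter x _ v (PySem.List.sorted_pairwise l (fun p => p.1)), ih,
      List.filter_append]
    congr 1
    split <;> simp_all


theorem pvGroupVals_nil : pvGroupVals [] = [] := by simp [pvGroupVals]

theorem pvMapFst_all_ge (y : Int × Int) (ys : List (Int × Int))
    (ht : (y :: ys).Pairwise (fun p q => p.1 ≤ q.1)) :
    ∀ v ∈ (y :: ys).map (·.1), y.1 ≤ v := by
  intro v hv
  obtain ⟨p, hp, rfl⟩ := List.mem_map.1 hv
  rcases List.mem_cons.1 hp with rfl | hp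
  · exact le_refl _
  · exact List.rel_of_pairwise_cons ht hp

theorem pvFilter_skip_front (v : Int) (front r : List (Int × Int))
    (hfr : ∀ p ∈ front, p.1 ≠ v) :
    ((front ++ r).filter (fun p => p.1 == v)) = r.filter (fun p => p.1 == v) := by
  rw [List.filter_append,
    List.filter_eq_nil_iff.2 (fun p hp => by simpa using hfr p hp), List.nil_append]

theorem pvMem_fst_append (v : Int) (front r : List (Int × Int)) (hfr : ∀ p ∈ front, p.1 ≠ v) :
    (v ∈ (front ++ r).map (·.1)) ↔ v ∈ r.map (·.1) := by
  simp only [List.map_append, List.mem_append]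
  constructor
  · rintro (h | h)
    · obtain ⟨p, hp, rfl⟩ := List.mem_map.1 h
      exact absurd rfl (hfr p hp)
    · exact h
  · exact Or.inr

theorem pvLoop_eq_aux (n : Nat) : ∀ (s t : List (Int × Int)), s.length + t.length ≤ n →
    s.Pairwise (fun p q => p.1 ≤ q.1) → t.Pairwise (fun p q => p.1 ≤ q.1) →
    pvLoop s t = ((pvGroupVals s).filter (fun v => decide (v ∈ t.map (·.1)))).map
      (fun v => (v, (s.filter (fun p => p.1 == v)).map (·.2),
                    (t.filter (fun p => p.1 == v)).map (·.2))) := by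
  induction n with
  | zero =>
    intro s t hlen _ _
    have hs0 : s = [] := List.length_eq_zero_iff.1 (by omega)
    have ht0 : t = [] := List.length_eq_zero_iff.1 (by omega)
    subst hs0; subst ht0
    simp [pvLoop_nil_left, pvGroupVals_nil]
  | succ n ih =>
    intro s t hlen hs ht
    cases s with
    | nil => simp [pvLoop_nil_left, pvGroupVals_nil]
    | cons x xs =>
    cases t with
    | nil => simp [pvLoop_nil_right]
    | cons y ys =>
    rw [pvLoop_cons_cons]
    by_cases hle : x.1 ≤ y.1
    · by_cases heq : x.1 = y.1
      · -- equal keys: emit a group from both sides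
        rw [if_pos hle, if_pos heq, pvTakeDup_eq, pvTakeDup_eq, pvGroupVals_cons,
          List.filter_cons_of_pos (by simp [heq]), List.map_cons]
        have hdlen : (xs.dropWhile (fun p => p.1 == x.1)).length
            + (ys.dropWhile (fun p => p.1 == y.1)).length ≤ n := by
          have h1 := List.length_dropWhile_le (fun p : Int × Int => p.1 == x.1) xs
          have h2 := List.length_dropWhile_le (fun p : Int × Int => p.1 == y.1) ys
          simp only [List.length_cons] at hlen; omega
        have hdsa : (xs.dropWhile (fun p => p.1 == x.1)).Pairwise (fun p q => p.1 ≤ q.1) :=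
          List.Pairwise.sublist (List.dropWhile_sublist _) hs.tail
        have hdsb : (ys.dropWhile (fun p => p.1 == y.1)).Pairwise (fun p q => p.1 ≤ q.1) :=
          List.Pairwise.sublist (List.dropWhile_sublist _) ht.tail
        congr 1
        · -- the emitted triple
          rw [pvFilter_head x xs hs, heq, pvFilter_head y ys ht]
          simp
        · -- the tail of the output
          rw [ih _ _ hdlen hdsa hdsb]
          have hmm : ∀ v ∈ pvGroupVals (xs.dropWhile (fun p => p.1 == x.1)), x.1 < v := by
            intro v hv
            obtain ⟨p, hp, rfl⟩ := List.mem_map.1 ((pvGroupVals_mem _ _).1 hv)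
            exact pvDropWhile_gt x xs hs p hp
          rw [List.filter_congr (fun v hv => ?_)]
          · apply List.map_congr_left
            intro v hv
            have hvgt : x.1 < v := hmm v (List.mem_of_mem_filter hv)
            have hsfront : ∀ p ∈ x :: xs.takeWhile (fun p => p.1 == x.1), p.1 ≠ v := by
              intro p hp
              rcases List.mem_cons.1 hp with rfl | hp
              · exact ne_of_lt hvgt
              · have := List.mem_takeWhile_imp (p := fun q : Int × Int => q.1 == x.1) hp
                simp only [beq_iff_eq] at this
                rw [this]; exact ne_of_lt hvgt
            have htfront : ∀ p ∈ y :: ys.takeWhile (fun p => p.1 == y.1), p.1 ≠ v := by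
              intro p hp
              rcases List.mem_cons.1 hp with rfl | hp
              · rw [← heq]; exact ne_of_lt hvgt
              · have := List.mem_takeWhile_imp (p := fun q : Int × Int => q.1 == y.1) hp
                simp only [beq_iff_eq] at this
                rw [this, ← heq]; exact ne_of_lt hvgt
            have hsdec : x :: xs = (x :: xs.takeWhile (fun p => p.1 == x.1))
                ++ xs.dropWhile (fun p => p.1 == x.1) := by
              simp [List.takeWhile_append_dropWhile]
            have htdec : y :: ys = (y :: ys.takeWhile (fun p => p.1 == y.1))
                ++ ys.dropWhile (fun p => p.1 == y.1) := by
              simp [List.takeWhile_append_dropWhile]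
            rw [hsdec, htdec, pvFilter_skip_front v _ _ hsfront, pvFilter_skip_front v _ _ htfront]
          · -- membership in t vs in the dropped tail of t
            have hvgt : x.1 < v := hmm v hv
            have htfront : ∀ p ∈ y :: ys.takeWhile (fun p => p.1 == y.1), p.1 ≠ v := by
              intro p hp
              rcases List.mem_cons.1 hp with rfl | hp
              · rw [← heq]; exact ne_of_lt hvgt
              · have := List.mem_takeWhile_imp (p := fun q : Int × Int => q.1 == y.1) hp
                simp only [beq_iff_eq] at this
                rw [this, ← heq]; exact ne_of_lt hvgt
            have htdec : y :: ys = (y :: ys.takeWhile (fun p => p.1 == y.1))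
                ++ ys.dropWhile (fun p => p.1 == y.1) := by
              simp [List.takeWhile_append_dropWhile]
            rw [show ((y :: ys).map (fun p => p.1)) = _ from congrArg (List.map (fun p : Int × Int => p.1)) htdec]
            rw [decide_eq_decide.2 (pvMem_fst_append v _ _ htfront)]
      · -- x.1 < y.1 : skip the x-group on the left
        have hlt : x.1 < y.1 := lt_of_le_of_ne hle heq
        rw [if_pos hle, if_neg heq]
        obtain ⟨pre, hpre_eq, hpre_all, hhead⟩ := pvSkipDup_spec x.1 xs
        have hsklen := pvSkipDup_len x.1 xs
        set s' := pvSkipDup x.1 xs with hs'def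
        have hsuf : s'.Sublist xs := by
          rw [hpre_eq]; exact List.sublist_append_right _ _
        have hs'pw : s'.Pairwise (fun p q => p.1 ≤ q.1) :=
          List.Pairwise.sublist hsuf hs.tail
        have hlen' : s'.length + (y :: ys).length ≤ n := by
          simp only [List.length_cons] at hlen ⊢; omega
        rw [ih _ _ hlen' hs'pw ht]
        have hxnot : ¬ x.1 ∈ ((y :: ys).map (·.1)) := fun h =>
          absurd (pvMapFst_all_ge y ys ht x.1 h) (not_le.2 hlt)
        rw [pvGroupVals_cons, List.filter_cons_of_neg (by simpa using hxnot)]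
        have hxle : ∀ p ∈ xs, x.1 ≤ p.1 := fun p hp => List.rel_of_pairwise_cons hs hp
        have hdrop : xs.dropWhile (fun p => p.1 == x.1)
            = s'.dropWhile (fun p => p.1 == x.1) := by
          conv_lhs => rw [hpre_eq]
          rw [List.dropWhile_append]
          have : pre.dropWhile (fun p => p.1 == x.1) = [] :=
            List.dropWhile_eq_nil_iff.2 (fun p hp => by simp [hpre_all p hp])
          simp [this]
        clear hs'def
        cases hsk : s' with
        | nil =>
          rw [hsk] at hdrop
          simp only [List.dropWhile_nil] at hdrop
          rw [hdrop]
          simp [pvGroupVals_nil]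
        | cons z rest =>
          rw [hsk] at hdrop hhead
          by_cases hz : z.1 = x.1
          · have hrest : rest = [] := by
              by_contra hne
              exact hhead z rest rfl hne hz
            subst hrest
            rw [show (z :: []).dropWhile (fun p => p.1 == x.1) = [] from by simp [hz]] at hdrop
            rw [hdrop, pvGroupVals_nil]
            have hznot : ¬ z.1 ∈ ((y :: ys).map (·.1)) := by
              rw [hz]; exact hxnot
            rw [pvGroupVals_cons]
            simp only [List.dropWhile_nil, pvGroupVals_nil]
            rw [List.filter_cons_of_neg (by simpa using hznot)]
            simp
          · rw [show (z :: rest).dropWhile (fun p => p.1 == x.1) = z :: rest from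
              List.dropWhile_cons_of_neg (by simp [hz])] at hdrop
            rw [hdrop]
            apply List.map_congr_left
            intro v hv
            have hvmem : v ∈ (z :: rest).map (·.1) :=
              (pvGroupVals_mem _ _).1 (List.mem_of_mem_filter hv)
            have hzgt : x.1 < z.1 := by
              refine lt_of_le_of_ne (hxle z ?_) (Ne.symm hz)
              rw [hpre_eq, hsk]; simp
            have hvgt : x.1 < v := lt_of_lt_of_le hzgt
              (pvMapFst_all_ge z rest (hsk ▸ hs'pw) v hvmem)
            have hfront : ∀ p ∈ x :: pre, p.1 ≠ v := by
              intro p hp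
              rcases List.mem_cons.1 hp with rfl | hp
              · exact ne_of_lt hvgt
              · rw [hpre_all p hp]; exact ne_of_lt hvgt
            have hsdec : x :: xs = (x :: pre) ++ (z :: rest) := by
              rw [hpre_eq, hsk]; rfl
            rw [hsdec, pvFilter_skip_front v _ _ hfront]
    · -- y.1 < x.1 : skip the y-group on the right
      have hgt : y.1 < x.1 := not_le.1 hle
      rw [if_neg hle]
      obtain ⟨pre, hpre_eq, hpre_all, _⟩ := pvSkipDup_spec y.1 ys
      have hsklen := pvSkipDup_len y.1 ys
      set t' := pvSkipDup y.1 ys with ht'def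
      have hsuf : t'.Sublist ys := by
        rw [hpre_eq]; exact List.sublist_append_right _ _
      have ht'pw : t'.Pairwise (fun p q => p.1 ≤ q.1) :=
        List.Pairwise.sublist hsuf ht.tail
      have hlen' : (x :: xs).length + t'.length ≤ n := by
        simp only [List.length_cons] at hlen ⊢; omega
      rw [ih _ _ hlen' hs ht'pw]
      have hvge : ∀ v ∈ pvGroupVals (x :: xs), y.1 < v := by
        intro v hv
        exact lt_of_lt_of_le hgt
          (pvMapFst_all_ge x xs hs v ((pvGroupVals_mem _ _).1 hv))
      have hfront : ∀ v, y.1 < v → ∀ p ∈ y :: pre, p.1 ≠ v := by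
        intro v hvgt p hp
        rcases List.mem_cons.1 hp with rfl | hp
        · exact ne_of_lt hvgt
        · rw [hpre_all p hp]; exact ne_of_lt hvgt
      have htdec : y :: ys = (y :: pre) ++ t' := by
        rw [hpre_eq]; rfl
      rw [List.filter_congr (fun v hv => ?_)]
      · apply List.map_congr_left
        intro v hv
        have hvgt : y.1 < v := hvge v (List.mem_of_mem_filter hv)
        rw [htdec, pvFilter_skip_front v _ _ (hfront v hvgt)]
      · have hvgt : y.1 < v := hvge v hv
        rw [show ((y :: ys).map (fun p => p.1)) = _ from congrArg (List.map (fun p : Int × Int => p.1)) htdec]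
        rw [decide_eq_decide.2 (pvMem_fst_append v _ _ (hfront v hvgt))]

theorem pvZip_map_fst (xs : List Int) :
    (xs.zip (PySem.List.pyRange 0 (xs.length : Int) 1)).map (·.1) = xs := by
  apply List.map_fst_zip
  rw [PySem.List.length_pyRange_one]
  omega

theorem pvSortedEnum_mem_fst (xs : List Int) (v : Int) :
    v ∈ (PySem.List.sorted (xs.zip (PySem.List.pyRange 0 (xs.length : Int) 1)) (fun x => x.1)).map (·.1)
      ↔ v ∈ xs := by
  constructor
  · intro h
    obtain ⟨p, hp, rfl⟩ := List.mem_map.1 h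
    have : p ∈ xs.zip (PySem.List.pyRange 0 (xs.length : Int) 1) :=
      (PySem.List.sorted_perm _ _ _).subset hp
    exact pvZip_map_fst xs ▸ List.mem_map.2 ⟨p, this, rfl⟩
  · intro h
    rw [← pvZip_map_fst xs] at h
    obtain ⟨p, hp, rfl⟩ := List.mem_map.1 h
    exact List.mem_map.2 ⟨p, ((PySem.List.sorted_perm _ _ _).mem_iff).2 hp, rfl⟩


theorem pvEnumerate_swap (xs : List Int) : ∀ s : Int,
    (PySem.List.enumerate xs s).map (fun p => (p.2, p.1)) = xs.zip (PySem.List.pyRange s (s + (xs.length : Int)) 1) := by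
  induction xs with
  | nil => intro s; simp [PySem.List.enumerate_nil]
  | cons x xs ih =>
    intro s
    have hlt : s < s + ((x :: xs).length : Int) := by simp only [List.length_cons]; push_cast; omega
    rw [PySem.List.enumerate_cons, PySem.List.pyRange_one_cons hlt]
    simp only [List.map_cons, List.zip_cons_cons]
    rw [ih (s + 1)]
    have : s + ((x :: xs).length : Int) = (s + 1) + (xs.length : Int) := by
      simp only [List.length_cons]; push_cast; ring
    rw [this]

theorem pvIndexDict_keys (xs : List Int) : (pvIndexDict xs).keys = PySem.Set.ofList xs := by
  unfold pvIndexDict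
  rw [PySem.Dict.keys_foldl_modify_key (PySem.List.enumerate xs) (fun p => p.2) [] (fun _ p l => l ++ [p.1]) PySem.Dict.empty]
  rw [PySem.List.map_snd_enumerate]
  rw [PySem.Set.ofList_eq_foldl]
  rfl

theorem pvIndexDict_getD (xs : List Int) (v : Int) :
    (pvIndexDict xs).getD v [] =
      ((xs.zip (PySem.List.pyRange 0 (xs.length : Int) 1)).filter (fun p => p.1 == v)).map (·.2) := by
  unfold pvIndexDict
  rw [show (PySem.List.enumerate xs).foldl (fun d p => d.modify p.2 [] (fun l => l ++ [p.1])) PySem.Dict.empty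
      = ((PySem.List.enumerate xs).map (fun p => (p.2, p.1))).foldl (fun d p => d.modify p.1 [] (fun l => l ++ [p.2])) PySem.Dict.empty from by
    rw [List.foldl_map]]
  rw [PySem.Dict.getD_foldl_modify_append]
  rw [pvEnumerate_swap xs 0]
  simp

theorem pvIndexDict_contains (xs : List Int) (v : Int) :
    (pvIndexDict xs).contains v = decide (v ∈ xs) := by
  have h1 : (pvIndexDict xs).contains v = true ↔ v ∈ (pvIndexDict xs).keys :=
    PySem.Dict.contains_iff_mem_keys _ _
  rw [pvIndexDict_keys, PySem.Set.mem_ofList] at h1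
  by_cases h : v ∈ xs <;> simp [h] at h1 ⊢ <;> simp [h1]


theorem pv_main (a b : List Int) : intersection_dup a b = intersection_dup_alt a b := by
  unfold intersection_dup intersection_dup_alt
  set ea := a.zip (PySem.List.pyRange 0 (a.length : Int) 1) with hea
  set eb := b.zip (PySem.List.pyRange 0 (b.length : Int) 1) with heb
  set sA := PySem.List.sorted ea (fun x => x.1) with hsA
  set sB := PySem.List.sorted eb (fun x => x.1) with hsB
  have hpA : sA.Pairwise (fun p q => p.1 ≤ q.1) := PySem.List.sorted_pairwise ea (fun x => x.1)
  have hpB : sB.Pairwise (fun p q => p.1 ≤ q.1) := PySem.List.sorted_pairwise eb (fun x => x.1)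
  rw [pvLoop_eq_aux (sA.length + sB.length) sA sB le_rfl hpA hpB]
  -- the two sorted value lists coincide
  have hmemA : ∀ v : Int, v ∈ sA.map (·.1) ↔ v ∈ a := fun v => pvSortedEnum_mem_fst a v
  have hmemB : ∀ v : Int, v ∈ sB.map (·.1) ↔ v ∈ b := fun v => pvSortedEnum_mem_fst b v
  have hgvPW : (pvGroupVals sA).Pairwise (· < ·) := pvGroupVals_pairwise sA hpA
  have hkeys : (pvIndexDict a).keys.filter (fun k => (pvIndexDict b).contains k)
      = (PySem.Set.ofList a).filter (fun k => decide (k ∈ b)) := by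
    rw [pvIndexDict_keys]
    exact List.filter_congr (fun k _ => pvIndexDict_contains b k)
  have hgvF : (pvGroupVals sA).filter (fun v => decide (v ∈ sB.map (·.1)))
      = (pvGroupVals sA).filter (fun v => decide (v ∈ b)) :=
    List.filter_congr (fun v _ => decide_eq_decide.2 (hmemB v))
  have hsorted : PySem.List.sorted ((pvIndexDict a).keys.filter (fun k => (pvIndexDict b).contains k)) (fun k => k)
      = (pvGroupVals sA).filter (fun v => decide (v ∈ sB.map (·.1))) := by
    rw [hkeys, hgvF]
    apply PySem.List.sorted_eq_of_perm_of_pairwise_lt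
    · apply List.Perm.filter
      rw [List.perm_ext_iff_of_nodup (hgvPW.imp ne_of_lt) (PySem.Set.nodup_ofList a)]
      intro v
      rw [pvGroupVals_mem, PySem.Set.mem_ofList, hmemA]
    · exact List.Pairwise.filter _ hgvPW
  simp only [hsorted]
  apply List.map_congr_left
  intro v _
  rw [pvIndexDict_getD a v, pvIndexDict_getD b v, hsA, hsB,
    pvSorted_filter_key' ea v, pvSorted_filter_key' eb v]

-- ===== VERDICT (by name: the statement is the Claim_ definition above) =====
theorem intersection_dup_spec : Claim_equal_intersection_dup := by
  unfold Claim_equal_intersection_dup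
  intro a b _
  unfold Spec_intersection_dup
  exact pv_main a b
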